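-- pv_equiv track=rewrite | github.com/geman220/ECS-Discord-Bot | Discord-Bot-WebUI/app/app_api_helpers.py | compute_rsvp_summary
-- ===== SOURCE A (Python) =====
-- from typing import Any, Dict, List, Optional, Tuple
--
-- def compute_rsvp_summary(availability_list: List[Dict]) -> Dict[str, int]:
--     """
--     Compute RSVP summary counts from a per-player availability list.
--
--     Takes the output of get_team_players_availability() and returns aggregate counts.
--
--     Args:
--         availability_list: List of dicts with 'availability' key
--             (values: 'yes', 'no', 'maybe', 'Not responded', or 'no_response')
--
--     Returns:
--         Dict with keys: yes, no, maybe, no_response, total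
--     """
--     summary = {'yes': 0, 'no': 0, 'maybe': 0, 'no_response': 0}
--     for item in availability_list:
--         response = item.get('availability', 'Not responded')
--         if response in ('Not responded', 'no_response'):
--             summary['no_response'] += 1
--         elif response in summary:
--             summary[response] += 1
--         else:
--             summary['no_response'] += 1
--     summary['total'] = sum(summary.values())
--     return summary
-- ===== SOURCE B (Python) =====
-- def compute_rsvp_summary(availability_list):
--     """Simpler: count each explicit category with a separate pass and derive
--     no_response by subtraction instead of maintaining a mutable counter dict."""
--     def resp(item):
--         return item.get('availability', 'Not responded')
--     total = len(availability_list)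
--     yes = sum(1 for it in availability_list if resp(it) == 'yes')
--     no = sum(1 for it in availability_list if resp(it) == 'no')
--     maybe = sum(1 for it in availability_list if resp(it) == 'maybe')
--     return {'yes': yes, 'no': no, 'maybe': maybe,
--             'no_response': total - yes - no - maybe, 'total': total}
-- ===== Notes on version B (the rewrite author's own statement) =====
-- stated objective: simpler
-- what changed: Replaces the mutable counter dict with branch dispatch by three independent category counts and derives no_response (and total) by arithmetic from len(), since the four buckets partition the list.
import Mathlib
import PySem

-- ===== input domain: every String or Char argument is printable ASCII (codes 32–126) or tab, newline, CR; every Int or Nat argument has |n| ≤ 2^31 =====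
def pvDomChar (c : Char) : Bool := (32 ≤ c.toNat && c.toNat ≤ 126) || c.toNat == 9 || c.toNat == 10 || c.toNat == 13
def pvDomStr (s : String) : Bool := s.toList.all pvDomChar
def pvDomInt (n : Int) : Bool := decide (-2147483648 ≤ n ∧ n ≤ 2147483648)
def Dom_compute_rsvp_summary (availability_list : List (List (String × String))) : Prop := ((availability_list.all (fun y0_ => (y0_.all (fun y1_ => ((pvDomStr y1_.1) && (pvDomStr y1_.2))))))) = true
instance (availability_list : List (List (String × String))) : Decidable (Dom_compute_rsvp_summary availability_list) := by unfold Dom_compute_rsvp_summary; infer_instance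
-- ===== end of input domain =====

-- ===== PORT A =====
-- item.get('availability', 'Not responded')
def pvResp (item : List (String × String)) : String :=
  (PySem.Dict.mk item).getD "availability" "Not responded"

def compute_rsvp_summary (availability_list : List (List (String × String))) : List (String × Int) :=
  let init : PySem.Dict String Int :=
    PySem.Dict.mk [("yes", 0), ("no", 0), ("maybe", 0), ("no_response", 0)]
  let summary := availability_list.foldl (fun d item =>
    let response := pvResp item
    if response = "Not responded" ∨ response = "no_response" then
      d.modify "no_response" 0 (· + 1)
    else if d.contains response then
      d.modify response 0 (· + 1)
    else
      d.modify "no_response" 0 (· + 1)) init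
  (summary.insert "total" summary.values.sum).items

-- ===== PORT B =====
def compute_rsvp_summary_alt (availability_list : List (List (String × String))) : List (String × Int) :=
  let total : Int := availability_list.length
  let yes : Int := availability_list.countP (fun it => pvResp it = "yes")
  let no : Int := availability_list.countP (fun it => pvResp it = "no")
  let maybe : Int := availability_list.countP (fun it => pvResp it = "maybe")
  [("yes", yes), ("no", no), ("maybe", maybe),
   ("no_response", total - yes - no - maybe), ("total", total)]

-- ===== PRECONDITION & SPEC =====
def Spec_compute_rsvp_summary (availability_list : List (List (String × String))) (out : List (String × Int)) : Prop := out = compute_rsvp_summary_alt availability_list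
instance (availability_list : List (List (String × String))) (out : List (String × Int)) : Decidable (Spec_compute_rsvp_summary availability_list out) := by unfold Spec_compute_rsvp_summary; infer_instance

-- ===== CLAIM (what is proved, stated in full; the proofs are below) =====
def Claim_equal_compute_rsvp_summary : Prop := ∀ (availability_list : List (List (String × String))), Dom_compute_rsvp_summary availability_list → Spec_compute_rsvp_summary availability_list (compute_rsvp_summary availability_list)

-- ===== LEMMAS AND PROOFS =====

-- A's loop body as a named function (definitionally equal to the inline lambda in the port).
def pvStep (d : PySem.Dict String Int) (item : List (String × String)) : PySem.Dict String Int :=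
  let response := pvResp item
  if response = "Not responded" ∨ response = "no_response" then
    d.modify "no_response" 0 (· + 1)
  else if d.contains response then
    d.modify response 0 (· + 1)
  else
    d.modify "no_response" 0 (· + 1)

-- Loop invariant: folding A's step over l adds each item's category count to the four buckets;
-- everything that is not 'yes'/'no'/'maybe' lands in 'no_response', so that bucket gains length - the three counts.
lemma loopA (l : List (List (String × String))) (a b c e : Int) :
    l.foldl pvStep (PySem.Dict.mk [("yes", a), ("no", b), ("maybe", c), ("no_response", e)]) =
    PySem.Dict.mk [("yes", a + l.countP (fun it => pvResp it = "yes")),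
                   ("no", b + l.countP (fun it => pvResp it = "no")),
                   ("maybe", c + l.countP (fun it => pvResp it = "maybe")),
                   ("no_response", e + ((l.length : Int)
                      - l.countP (fun it => pvResp it = "yes")
                      - l.countP (fun it => pvResp it = "no")
                      - l.countP (fun it => pvResp it = "maybe")))] := by
  induction l generalizing a b c e with
  | nil => simp
  | cons x xs ih =>
    simp only [List.foldl_cons]
    by_cases hy : pvResp x = "yes"
    · rw [show pvStep (PySem.Dict.mk [("yes", a), ("no", b), ("maybe", c), ("no_response", e)]) x
            = PySem.Dict.mk [("yes", a+1), ("no", b), ("maybe", c), ("no_response", e)] by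
          simp only [pvStep, hy]; norm_num; rfl]
      rw [ih]
      congr 1
      simp [hy]
      all_goals omega
    · by_cases hn : pvResp x = "no"
      · rw [show pvStep (PySem.Dict.mk [("yes", a), ("no", b), ("maybe", c), ("no_response", e)]) x
              = PySem.Dict.mk [("yes", a), ("no", b+1), ("maybe", c), ("no_response", e)] by
            simp only [pvStep, hn]; norm_num; rfl]
        rw [ih]
        congr 1
        simp [hn]
        all_goals omega
      · by_cases hm : pvResp x = "maybe"
        · rw [show pvStep (PySem.Dict.mk [("yes", a), ("no", b), ("maybe", c), ("no_response", e)]) x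
                = PySem.Dict.mk [("yes", a), ("no", b), ("maybe", c+1), ("no_response", e)] by
              simp only [pvStep, hm]; norm_num; rfl]
          rw [ih]
          congr 1
          simp [hm]
          all_goals omega
        · rw [show pvStep (PySem.Dict.mk [("yes", a), ("no", b), ("maybe", c), ("no_response", e)]) x
                = PySem.Dict.mk [("yes", a), ("no", b), ("maybe", c), ("no_response", e+1)] by
              by_cases h1 : pvResp x = "Not responded" ∨ pvResp x = "no_response"
              · rcases h1 with h1 | h1 <;> (simp only [pvStep, h1]; norm_num; rfl)
              · have hc : (PySem.Dict.mk [("yes", a), ("no", b), ("maybe", c), ("no_response", e)]).contains (pvResp x) = false := by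
                  simp [PySem.Dict.contains_mk]
                  tauto
                simp only [pvStep]; rw [if_neg h1, if_neg (by simp [hc])]; rfl]
          rw [ih]
          congr 1
          simp [hy, hn, hm]
          all_goals omega

-- insert of the fresh key 'total' appends; values of the four-key literal dict.
lemma itemsIns (a b c e v : Int) :
    ((PySem.Dict.mk [("yes", a), ("no", b), ("maybe", c), ("no_response", e)]).insert "total" v).items
    = [("yes", a), ("no", b), ("maybe", c), ("no_response", e), ("total", v)] := rfl

lemma valsMk (a b c e : Int) :
    (PySem.Dict.mk [("yes", a), ("no", b), ("maybe", c), ("no_response", e)]).values = [a, b, c, e] := rfl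

-- ===== VERDICT (by name: the statement is the Claim_ definition above) =====
theorem compute_rsvp_summary_spec : Claim_equal_compute_rsvp_summary := by
  intro l _
  unfold Spec_compute_rsvp_summary
  simp only [compute_rsvp_summary, compute_rsvp_summary_alt]
  rw [show (fun (d : PySem.Dict String Int) (item : List (String × String)) =>
        if pvResp item = "Not responded" ∨ pvResp item = "no_response" then d.modify "no_response" 0 (· + 1)
        else if d.contains (pvResp item) then d.modify (pvResp item) 0 (· + 1)
        else d.modify "no_response" 0 (· + 1)) = pvStep from rfl]
  rw [loopA, valsMk, itemsIns]
  simp
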